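-- pv_equiv track=rewrite | github.com/Crisp-Unimib/MED-ITA | run_eval.py | extract_answer_fast
-- ===== SOURCE A (Python) =====
-- def extract_answer_fast(output: str) -> str:
--     LETTERS = "ABCDEFGHIJKLMNOPQRSTUVWXYZ"
--     min_index = min(
--         [output.find(letter) for letter in LETTERS if letter in output], default=-1
--     )
--     if min_index == -1:
--         return ""
--     return output[min_index]
-- ===== SOURCE B (Python) =====
-- LETTERS = "ABCDEFGHIJKLMNOPQRSTUVWXYZ"
--
-- def extract_answer_fast(output: str) -> str:
--     for c in output:
--         if c in LETTERS:
--             return c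
--     return ""
-- ===== Notes on version B (the rewrite author's own statement) =====
-- stated objective: simpler
-- what changed: Replaces A's 26 per-letter find() scans plus a min over the collected indices with one left-to-right pass that returns the first character belonging to A-Z.
import Mathlib
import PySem

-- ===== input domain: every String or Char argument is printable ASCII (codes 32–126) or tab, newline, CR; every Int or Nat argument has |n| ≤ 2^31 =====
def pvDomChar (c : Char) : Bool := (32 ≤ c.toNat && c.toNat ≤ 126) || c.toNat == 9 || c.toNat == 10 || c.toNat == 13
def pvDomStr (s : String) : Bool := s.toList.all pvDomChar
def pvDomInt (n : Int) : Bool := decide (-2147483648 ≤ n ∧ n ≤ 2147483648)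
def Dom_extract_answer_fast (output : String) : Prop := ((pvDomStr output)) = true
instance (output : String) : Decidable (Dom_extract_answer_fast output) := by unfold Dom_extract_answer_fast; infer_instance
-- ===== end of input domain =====

-- B replaces A's 26 per-letter find() scans plus a min over the indices with one
-- left-to-right pass returning the first character that is in "A..Z" (simpler).

-- ===== PORT A =====
def extract_answer_fast (output : String) : String :=
  let LETTERS := "ABCDEFGHIJKLMNOPQRSTUVWXYZ"
  let idxs := (LETTERS.toList.filter (fun letter => PySem.Str.isIn (String.ofList [letter]) output)).map
      (fun letter => PySem.Str.find output (String.ofList [letter]))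
  let min_index : Int := match PySem.List.min? idxs (fun x => x) with
    | none => -1
    | some m => m
  if min_index = -1 then ""
  else
    -- output[min_index]: in A this index is always in range (it came from find); the none branch is dead
    match PySem.Str.pyGet? output min_index with
    | some c => String.ofList [c]
    | none => ""

-- ===== PORT B =====
def extract_answer_fast_alt (output : String) : String :=
  match output.toList.find? (fun c => "ABCDEFGHIJKLMNOPQRSTUVWXYZ".toList.contains c) with
  | some c => String.ofList [c]
  | none => ""

-- ===== PRECONDITION & SPEC =====
def Spec_extract_answer_fast (output : String) (out : String) : Prop := out = extract_answer_fast_alt output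
instance (output : String) (out : String) : Decidable (Spec_extract_answer_fast output out) := by unfold Spec_extract_answer_fast; infer_instance

-- ===== CLAIM (what is proved, stated in full; the proofs are below) =====
def Claim_equal_extract_answer_fast : Prop := ∀ (output : String), Dom_extract_answer_fast output → Spec_extract_answer_fast output (extract_answer_fast output)

-- ===== LEMMAS AND PROOFS =====

theorem pv_singleton_prefix_drop {s : List Char} {a : Char} {i : Nat} :
    [a] <+: s.drop i ↔ s[i]? = some a := by
  constructor
  · rintro ⟨t, ht⟩
    have : (s.drop i).head? = some a := by rw [← ht]; rfl
    simpa [List.head?_drop] using this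
  · intro h
    have h' : (s.drop i).head? = some a := by simpa [List.head?_drop] using h
    cases hd : s.drop i with
    | nil => simp [hd] at h'
    | cons x t =>
      simp [hd] at h'
      exact ⟨t, by simp [h']⟩

theorem pv_singleton_infix {s : List Char} {a : Char} : [a] <:+: s ↔ a ∈ s := by
  constructor
  · rintro ⟨p, q, h⟩; subst h; simp
  · intro h
    obtain ⟨i, hi, hgi⟩ := List.getElem_of_mem h
    exact List.infix_iff_prefix_suffix.mpr ⟨s.drop i,
      pv_singleton_prefix_drop.mpr (by simp [List.getElem?_eq_getElem hi, hgi]),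
      List.drop_suffix i s⟩

-- Chars.find on a singleton pattern is exactly the first index of that character
theorem pv_find_singleton {s : List Char} {a : Char} {j : Nat} (hj : j < s.length)
    (h1 : s[j] = a) (h2 : ∀ i (hi : i < j), s[i]'(Nat.lt_trans hi hj) ≠ a) :
    PySem.Chars.find s [a] = (j : Int) := by
  have hmem : a ∈ s := h1 ▸ List.getElem_mem hj
  have hnn : 0 ≤ PySem.Chars.find s [a] :=
    (PySem.Chars.find_nonneg_iff s [a]).mpr (pv_singleton_infix.mpr hmem)
  obtain ⟨hpre, hmin⟩ := PySem.Chars.find_spec (s := s) (sub := [a]) hnn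
  set k := (PySem.Chars.find s [a]).toNat with hk
  have hk1 : s[k]? = some a := pv_singleton_prefix_drop.mp hpre
  have hklen : k < s.length := by
    by_contra h
    simp [List.getElem?_eq_none (by omega : s.length ≤ k)] at hk1
  have hka : s[k] = a := by simpa [List.getElem?_eq_getElem hklen] using hk1
  have hjk : ¬ j < k := by
    intro hlt
    exact (hmin j hlt) (pv_singleton_prefix_drop.mpr (by simp [List.getElem?_eq_getElem hj, h1]))
  have hkj : ¬ k < j := fun hlt => (h2 k hlt) hka
  have : k = j := by omega
  omega

theorem pv_main (s : List Char) :
    (let idxs := (("ABCDEFGHIJKLMNOPQRSTUVWXYZ".toList.filter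
        (fun letter => PySem.Chars.isIn [letter] s)).map
        (fun letter => PySem.Chars.find s [letter]))
     let min_index : Int := match PySem.List.min? idxs (fun x => x) with
       | none => -1
       | some m => m
     if min_index = -1 then ""
     else match PySem.List.pyGet? s min_index with
       | some c => String.ofList [c]
       | none => "") =
    (match s.find? (fun c => "ABCDEFGHIJKLMNOPQRSTUVWXYZ".toList.contains c) with
     | some c => String.ofList [c]
     | none => "") := by
  set letters := "ABCDEFGHIJKLMNOPQRSTUVWXYZ".toList with hlet
  set p : Char → Bool := fun c => letters.contains c with hp
  set idxs := (letters.filter (fun letter => PySem.Chars.isIn [letter] s)).map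
      (fun letter => PySem.Chars.find s [letter]) with hidxs
  have hisin : ∀ a : Char, PySem.Chars.isIn [a] s = true ↔ a ∈ s := by
    intro a
    rw [PySem.Chars.isIn_iff_infix, pv_singleton_infix]
  cases hf : s.find? p with
  | none =>
    have hall : ∀ x ∈ s, p x = false := by
      intro x hx
      simpa using List.find?_eq_none.mp hf x hx
    have hnil : idxs = [] := by
      rw [hidxs, List.map_eq_nil_iff, List.filter_eq_nil_iff]
      intro a ha hin
      have hmem : a ∈ s := (hisin a).mp hin
      have : p a = false := hall a hmem
      simp [hp] at this
      exact this ha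
    simp [hnil, PySem.List.min?]
  | some c =>
    obtain ⟨hpc, j, hj, hgj, hbefore⟩ := List.find?_eq_some_iff_getElem.mp hf
    have hcletters : c ∈ letters := by simpa [hp] using hpc
    have hcs : c ∈ s := hgj ▸ List.getElem_mem hj
    have hfindc : PySem.Chars.find s [c] = (j : Int) := by
      apply pv_find_singleton hj hgj
      intro i hi hia
      have := hbefore i hi
      rw [hia] at this
      simp [hpc] at this
    have hjmem : (j : Int) ∈ idxs := by
      rw [hidxs]
      refine List.mem_map.mpr ⟨c, List.mem_filter.mpr ⟨hcletters, ?_⟩, hfindc⟩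
      simpa using (hisin c).mpr hcs
    cases hm : PySem.List.min? idxs (fun x => x) with
    | none =>
      rw [PySem.List.min?_eq_none_iff] at hm
      simp [hm] at hjmem
    | some m =>
      have hmem := PySem.List.min?_mem hm
      obtain ⟨d, hd, hdm⟩ := List.mem_map.mp (hidxs ▸ hmem)
      obtain ⟨hdlet, hdin⟩ := List.mem_filter.mp hd
      have hds : d ∈ s := (hisin d).mp (by simpa using hdin)
      have hmnn : 0 ≤ m := by
        rw [← hdm]
        exact (PySem.Chars.find_nonneg_iff s [d]).mpr (pv_singleton_infix.mpr hds)
      have hmj : m ≤ (j : Int) := PySem.List.min?_isMin hm _ hjmem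
      have hjm : (j : Int) ≤ m := by
        /- m = find s [d]; the char at that position satisfies p, so j ≤ it -/
        have hnn' : 0 ≤ PySem.Chars.find s [d] := hdm ▸ hmnn
        obtain ⟨hpre, -⟩ := PySem.Chars.find_spec hnn'
        have hk1 : s[(PySem.Chars.find s [d]).toNat]? = some d := pv_singleton_prefix_drop.mp hpre
        have hklen : (PySem.Chars.find s [d]).toNat < s.length := by
          by_contra hcon
          simp [List.getElem?_eq_none (by omega : s.length ≤ (PySem.Chars.find s [d]).toNat)] at hk1
        have hkd : s[(PySem.Chars.find s [d]).toNat] = d := by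
          simpa [List.getElem?_eq_getElem hklen] using hk1
        have hjle : j ≤ (PySem.Chars.find s [d]).toNat := by
          by_contra hcon
          have hlt : (PySem.Chars.find s [d]).toNat < j := by omega
          have := hbefore _ hlt
          rw [hkd] at this
          simp [hp, hdlet] at this
        omega
      have hmeqj : m = (j : Int) := le_antisymm hmj hjm
      have hne : m ≠ -1 := by omega
      simp only [hm, hne, if_false]
      rw [hmeqj, PySem.List.pyGet?_natCast, List.getElem?_eq_getElem hj, hgj]

theorem extract_answer_fast_spec : Claim_equal_extract_answer_fast := by
  intro output _
  unfold Spec_extract_answer_fast extract_answer_fast extract_answer_fast_alt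
  have := pv_main output.toList
  simpa [PySem.Str.isIn, PySem.Str.find, PySem.Str.pyGet?] using this
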